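-- pv_equiv track=rewrite | github.com/LukasWana/ad-radar | discover_ads.py | filter_format
-- ===== SOURCE A (Python) =====
-- def filter_format(results, preferred_format):
--     """Filtruje výsledky podle preferovaného formátu"""
--     if preferred_format == 'all':
--         return results
--
--     filtered = [r for r in results if r['format'] == preferred_format]
--
--     # Pokud je málo výsledků, doplň i partial match
--     if len(filtered) < 5:
--         partial = [r for r in results if r['format'] != 'other' and r['format'] != preferred_format]
--         filtered.extend(partial[:5 - len(filtered)])
--
--     return filtered
-- ===== SOURCE B (Python) =====
-- def filter_format(results, preferred_format):
--     """Filtruje výsledky podle preferovaného formátu"""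
--     if preferred_format == 'all':
--         return results
--
--     def rank(r):
--         f = r['format']
--         if f == preferred_format:
--             return 0
--         if f != 'other':
--             return 1
--         return 2
--
--     ordered = sorted(results, key=rank)
--     ne = 0
--     ep = 0
--     for r in ordered:
--         t = rank(r)
--         if t == 0:
--             ne += 1
--         if t <= 1:
--             ep += 1
--     k = ne if ne >= 5 else min(5, ep)
--     return ordered[:k]
-- ===== Notes on version B (the rewrite author's own statement) =====
-- stated objective: alternative
-- what changed: Replaces A's two filter scans and list concatenation with a stable sort of results by match rank (exact < partial < other) followed by a counting pass and a single prefix take at the computed cutoff.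
-- outside the precondition, e.g. on filter_format([{'fmt': 'mp3'}], 'mp3'): A raises KeyError, B raises KeyError
import Mathlib
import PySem

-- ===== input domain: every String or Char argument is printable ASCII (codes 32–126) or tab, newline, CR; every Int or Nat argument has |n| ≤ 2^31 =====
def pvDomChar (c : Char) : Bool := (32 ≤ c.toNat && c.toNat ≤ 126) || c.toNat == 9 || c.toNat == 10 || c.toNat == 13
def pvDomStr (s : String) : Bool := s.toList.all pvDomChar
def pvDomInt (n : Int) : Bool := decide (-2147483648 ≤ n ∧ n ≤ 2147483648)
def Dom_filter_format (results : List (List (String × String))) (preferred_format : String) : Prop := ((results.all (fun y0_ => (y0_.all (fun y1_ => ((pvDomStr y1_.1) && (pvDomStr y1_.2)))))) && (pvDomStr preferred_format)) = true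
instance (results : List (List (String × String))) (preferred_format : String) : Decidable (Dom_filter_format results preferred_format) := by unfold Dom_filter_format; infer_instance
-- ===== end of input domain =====

-- B replaces A's two filter scans with a stable sort by match rank plus a prefix take (objective: alternative).
-- r['format'] (dict lookup = first match in the association list); defaults to "" only outside Pre_.
def pvFmt (r : List (String × String)) : String :=
  (((r.find? (fun p => p.1 == "format")).map (·.2)).getD "")

-- ===== PORT A =====
def filter_format (results : List (List (String × String))) (preferred_format : String) : List (List (String × String)) :=
  if preferred_format == "all" then results
  else
    let filtered := results.filter (fun r => pvFmt r == preferred_format)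
    if filtered.length < 5 then
      filtered ++ (results.filter (fun r => pvFmt r != "other" && pvFmt r != preferred_format)).take (5 - filtered.length)
    else filtered

-- ===== PORT B =====
-- rank(r): 0 exact match, 1 partial match, 2 excluded
def pvRank (pf : String) (r : List (String × String)) : Nat :=
  if pvFmt r == pf then 0 else if pvFmt r != "other" then 1 else 2

-- the body of B's counting loop: (ne, ep) counters
def pvTally (pf : String) (acc : Nat × Nat) (r : List (String × String)) : Nat × Nat :=
  let t := pvRank pf r
  (if t = 0 then acc.1 + 1 else acc.1, if t ≤ 1 then acc.2 + 1 else acc.2)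

def filter_format_alt (results : List (List (String × String))) (preferred_format : String) : List (List (String × String)) :=
  if preferred_format == "all" then results
  else
    let ordered := PySem.List.sorted results (pvRank preferred_format)
    let c := ordered.foldl (pvTally preferred_format) (0, 0)
    let k := if 5 ≤ c.1 then c.1 else min 5 c.2
    ordered.take k

-- ===== PRECONDITION & SPEC =====
-- Pre_ excludes inputs where some dict lacks the key 'format' (Python A raises KeyError there),
-- unless preferred_format is 'all' (A returns before any lookup).
def Pre_filter_format (results : List (List (String × String))) (preferred_format : String) : Prop :=
  preferred_format = "all" ∨ ∀ r ∈ results, (r.find? (fun p => p.1 == "format")).isSome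
instance (results : List (List (String × String))) (preferred_format : String) : Decidable (Pre_filter_format results preferred_format) := by unfold Pre_filter_format; infer_instance
def pvWitness_filter_format : (List (List (String × String))) × String :=
  ([[("format", "mp3")], [("format", "flac")]], "mp3")

def Spec_filter_format (results : List (List (String × String))) (preferred_format : String) (out : List (List (String × String))) : Prop := out = filter_format_alt results preferred_format
instance (results : List (List (String × String))) (preferred_format : String) (out : List (List (String × String))) : Decidable (Spec_filter_format results preferred_format out) := by unfold Spec_filter_format; infer_instance

-- ===== CLAIM (what is proved, stated in full; the proofs are below) =====
def Claim_equal_filter_format : Prop := ∀ (results : List (List (String × String))) (preferred_format : String), Dom_filter_format results preferred_format → Pre_filter_format results preferred_format → Spec_filter_format results preferred_format (filter_format results preferred_format)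

-- ===== LEMMAS AND PROOFS =====

-- insertBy skips a prefix it is not "before"
theorem pv_insertBy_append {α : Type} (before : α → α → Bool) (x : α) (as bs : List α)
    (h : ∀ a ∈ as, before x a = false) :
    PySem.List.insertBy before x (as ++ bs) = as ++ PySem.List.insertBy before x bs := by
  induction as with
  | nil => simp
  | cons a as ih =>
    have ha : before x a = false := h a (by simp)
    simp [PySem.List.insertBy, ha, ih (fun a' ha' => h a' (by simp [ha']))]

-- insertBy puts x in front when it is "before" everything
theorem pv_insertBy_front {α : Type} (before : α → α → Bool) (x : α) (ys : List α)
    (h : ∀ y ∈ ys, before x y = true) :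
    PySem.List.insertBy before x ys = x :: ys := by
  cases ys with
  | nil => simp [PySem.List.insertBy]
  | cons y ys => simp [PySem.List.insertBy, h y (by simp)]

-- stable sort by rank is the three rank classes in order
theorem pv_sorted_rank (pf : String) (xs : List (List (String × String))) :
    PySem.List.sorted xs (pvRank pf)
    = xs.filter (fun r => pvRank pf r == 0)
      ++ xs.filter (fun r => pvRank pf r == 1)
      ++ xs.filter (fun r => pvRank pf r == 2) := by
  induction xs using List.reverseRecOn with
  | nil => simp [PySem.List.sorted]
  | append_singleton xs x ih =>
    rw [PySem.List.sorted_eq_foldl_insertBy] at ih ⊢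
    rw [List.foldl_append, List.foldl_cons, List.foldl_nil, ih]
    have hrank : pvRank pf x = 0 ∨ pvRank pf x = 1 ∨ pvRank pf x = 2 := by
      unfold pvRank; split_ifs <;> simp
    have mem0 : ∀ a ∈ xs.filter (fun r => pvRank pf r == 0), pvRank pf a = 0 := by
      intro a ha; simpa using (List.mem_filter.mp ha).2
    have mem1 : ∀ a ∈ xs.filter (fun r => pvRank pf r == 1), pvRank pf a = 1 := by
      intro a ha; simpa using (List.mem_filter.mp ha).2
    have mem2 : ∀ a ∈ xs.filter (fun r => pvRank pf r == 2), pvRank pf a = 2 := by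
      intro a ha; simpa using (List.mem_filter.mp ha).2
    rcases hrank with h | h | h
    · rw [List.append_assoc,
        pv_insertBy_append _ _ _ _ (by intro a ha; simp [h, mem0 a ha]),
        pv_insertBy_front _ _ _ (by
          intro y hy
          rcases List.mem_append.mp hy with hy | hy
          · simp [h, mem1 y hy]
          · simp [h, mem2 y hy])]
      simp [List.filter_append, h]
    · rw [pv_insertBy_append _ _ _ _ (by
          intro a ha
          rcases List.mem_append.mp ha with ha | ha
          · simp [h, mem0 a ha]
          · simp [h, mem1 a ha]),
        pv_insertBy_front _ _ _ (by intro y hy; simp [h, mem2 y hy])]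
      simp [List.filter_append, h]
    · rw [PySem.List.insertBy_of_forall_not_before _ _ _ (by
          intro a ha
          rcases List.mem_append.mp ha with ha | ha
          · rcases List.mem_append.mp ha with ha | ha
            · simp [h, mem0 a ha]
            · simp [h, mem1 a ha]
          · simp [h, mem2 a ha])]
      simp [List.filter_append, h]

-- the counting loop adds (#rank0, #rank≤1)
theorem pv_tally_counts (pf : String) (xs : List (List (String × String))) (a b : Nat) :
    xs.foldl (pvTally pf) (a, b)
    = (a + (xs.countP (fun r => pvRank pf r == 0)),
       b + (xs.countP (fun r => decide (pvRank pf r ≤ 1)))) := by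
  induction xs generalizing a b with
  | nil => simp
  | cons x xs ih =>
    rw [List.foldl_cons, List.countP_cons, List.countP_cons]
    by_cases h0 : pvRank pf x = 0
    · have : pvTally pf (a, b) x = (a + 1, b + 1) := by simp [pvTally, h0]
      rw [this, ih]; simp [h0]; omega
    · by_cases h1 : pvRank pf x ≤ 1
      · have : pvTally pf (a, b) x = (a, b + 1) := by simp [pvTally, h0, h1]
        rw [this, ih]; simp [h0, h1]; omega
      · have : pvTally pf (a, b) x = (a, b) := by simp [pvTally, h0, h1]
        rw [this, ih]; simp [h0, h1]

-- ===== VERDICT (by name: the statement is the Claim_ definition above) =====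
theorem filter_format_spec : Claim_equal_filter_format := by
  intro results pf _ _
  unfold Spec_filter_format filter_format filter_format_alt
  by_cases hall : (pf == "all") = true
  · rw [if_pos hall, if_pos hall]
  · rw [if_neg hall, if_neg hall]
    simp only [pv_sorted_rank pf results, pv_tally_counts]
    set f0 := results.filter (fun r => pvRank pf r == 0) with hf0
    set f1 := results.filter (fun r => pvRank pf r == 1) with hf1
    set f2 := results.filter (fun r => pvRank pf r == 2) with hf2
    -- filters of the two ports coincide with the rank classes
    have e0 : results.filter (fun r => pvFmt r == pf) = f0 := by
      rw [hf0]; apply List.filter_congr; intro r _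
      unfold pvRank; split_ifs <;> simp_all
    have e1 : results.filter (fun r => pvFmt r != "other" && pvFmt r != pf) = f1 := by
      rw [hf1]; apply List.filter_congr; intro r _
      unfold pvRank; split_ifs <;> simp_all
    -- countP over the concatenation
    have c0 : ((f0 ++ f1 ++ f2).countP (fun r => pvRank pf r == 0)) = f0.length := by
      rw [List.countP_append, List.countP_append]
      have h0 : f0.countP (fun r => pvRank pf r == 0) = f0.length := by
        apply List.countP_eq_length.mpr; intro r hr; simpa using (List.mem_filter.mp hr).2
      have h1 : f1.countP (fun r => pvRank pf r == 0) = 0 := by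
        apply List.countP_eq_zero.mpr; intro r hr
        have := (List.mem_filter.mp hr).2; simp_all
      have h2 : f2.countP (fun r => pvRank pf r == 0) = 0 := by
        apply List.countP_eq_zero.mpr; intro r hr
        have := (List.mem_filter.mp hr).2; simp_all
      omega
    have c1 : ((f0 ++ f1 ++ f2).countP (fun r => decide (pvRank pf r ≤ 1))) = f0.length + f1.length := by
      rw [List.countP_append, List.countP_append]
      have h0 : f0.countP (fun r => decide (pvRank pf r ≤ 1)) = f0.length := by
        apply List.countP_eq_length.mpr; intro r hr
        have := (List.mem_filter.mp hr).2; simp_all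
      have h1 : f1.countP (fun r => decide (pvRank pf r ≤ 1)) = f1.length := by
        apply List.countP_eq_length.mpr; intro r hr
        have := (List.mem_filter.mp hr).2; simp_all
      have h2 : f2.countP (fun r => decide (pvRank pf r ≤ 1)) = 0 := by
        apply List.countP_eq_zero.mpr; intro r hr
        have := (List.mem_filter.mp hr).2; simp_all
      omega
    rw [e0, e1]
    simp only [c0, c1, Nat.zero_add]
    by_cases h5 : f0.length < 5
    · rw [if_pos h5, if_neg (by omega)]
      set k := min 5 (f0.length + f1.length) with hkdef
      have h1 : List.take k f0 = f0 := List.take_of_length_le (by omega)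
      have h2 : List.take (k - f0.length) (f1 ++ f2) = List.take (k - f0.length) f1 :=
        List.take_append_of_le_length (by omega)
      have h3 : List.take (k - f0.length) f1 = List.take (5 - f0.length) f1 := by
        rw [List.take_eq_take_iff]; omega
      rw [List.append_assoc, List.take_append, h1, h2, h3]
    · rw [if_neg h5, if_pos (by omega), List.append_assoc, List.take_left]
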